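-- pv_equiv track=rewrite | github.com/twoong01/my_study | 프로그래머스/1/12919. 서울에서 김서방 찾기/서울에서 김서방 찾기.py | solution
-- ===== SOURCE A (Python) =====
-- def solution(seoul):
--     answer = ''
--     place = 0
--     for i in range(len(seoul)):
--         if seoul[i] == 'Kim':
--             place = i
--     answer = f'김서방은 {place}에 있다'
--     return answer
-- ===== SOURCE B (Python) =====
-- def solution(seoul):
--     if 'Kim' in seoul:
--         place = len(seoul) - 1 - seoul[::-1].index('Kim')
--     else:
--         place = 0
--     return f'김서방은 {place}에 있다'
-- ===== Notes on version B (the rewrite author's own statement) =====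
-- stated objective: alternative
-- what changed: B replaces A's forward scan that overwrites a tracker with a membership test plus a single reverse .index lookup computing the last occurrence directly (len-1-reversed.index), keeping the default 0 when 'Kim' is absent.
import Mathlib
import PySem

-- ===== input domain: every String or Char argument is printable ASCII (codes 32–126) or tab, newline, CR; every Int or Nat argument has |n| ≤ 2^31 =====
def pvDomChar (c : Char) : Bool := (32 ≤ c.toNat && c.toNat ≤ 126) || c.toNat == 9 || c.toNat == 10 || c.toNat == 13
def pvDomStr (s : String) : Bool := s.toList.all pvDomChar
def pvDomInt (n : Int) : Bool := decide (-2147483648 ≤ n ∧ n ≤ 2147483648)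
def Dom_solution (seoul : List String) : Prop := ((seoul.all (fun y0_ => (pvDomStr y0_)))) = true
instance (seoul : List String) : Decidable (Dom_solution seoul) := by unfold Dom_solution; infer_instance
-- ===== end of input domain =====

-- B computes the last index of 'Kim' directly (membership test + reverse lookup) instead of A's forward loop overwriting a tracker; objective: alternative.

-- ===== PORT A =====
def solution (seoul : List String) : String :=
  let place : Int :=
    (PySem.List.pyRange 0 (seoul.length : Int) 1).foldl
      (fun place i => if PySem.List.pyGetD seoul i "" = "Kim" then i else place) 0
  "김서방은 " ++ PySem.Int.toStr place ++ "에 있다"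

-- ===== PORT B =====
def solution_alt (seoul : List String) : String :=
  let place : Int :=
    if "Kim" ∈ seoul then
      (seoul.length : Int) - 1 - (((PySem.List.index? seoul.reverse "Kim").getD 0 : Nat) : Int)
    else 0
  "김서방은 " ++ PySem.Int.toStr place ++ "에 있다"

-- ===== PRECONDITION & SPEC =====
def Spec_solution (seoul : List String) (out : String) : Prop := out = solution_alt seoul
instance (seoul : List String) (out : String) : Decidable (Spec_solution seoul out) := by unfold Spec_solution; infer_instance

-- ===== CLAIM (what is proved, stated in full; the proofs are below) =====
def Claim_equal_solution : Prop := ∀ (seoul : List String), Dom_solution seoul → Spec_solution seoul (solution seoul)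

-- ===== LEMMAS AND PROOFS =====

theorem place_eq (xs : List String) :
    (PySem.List.pyRange 0 (xs.length : Int) 1).foldl
      (fun place i => if PySem.List.pyGetD xs i "" = "Kim" then i else place) 0
    = (if "Kim" ∈ xs then
        (xs.length : Int) - 1 - (((PySem.List.index? xs.reverse "Kim").getD 0 : Nat) : Int)
      else 0) := by
  induction xs using List.reverseRecOn with
  | nil => simp [PySem.List.pyRange_one_eq_nil]
  | append_singleton xs x ih =>
    have hlen : ((xs ++ [x]).length : Int) = (xs.length : Int) + 1 := by
      simp
    rw [hlen, PySem.List.pyRange_one_succ_right (by exact Int.natCast_nonneg _),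
        List.foldl_append]
    have hcongr :
        (PySem.List.pyRange 0 (xs.length : Int) 1).foldl
          (fun place i => if PySem.List.pyGetD (xs ++ [x]) i "" = "Kim" then i else place) 0
        = (PySem.List.pyRange 0 (xs.length : Int) 1).foldl
          (fun place i => if PySem.List.pyGetD xs i "" = "Kim" then i else place) 0 := by
      apply PySem.List.foldl_congr_mem
      intro acc i hi
      have h := (PySem.List.mem_pyRange_one.mp hi)
      rw [PySem.List.pyGetD_eq_getElem (xs ++ [x]) "" h.1 (by simp; omega),
          PySem.List.pyGetD_eq_getElem xs "" h.1 (by omega),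
          List.getElem_append_left (by omega)]
    have hlast : PySem.List.pyGetD (xs ++ [x]) (xs.length : Int) "" = x := by
      rw [PySem.List.pyGetD_eq_getElem (xs ++ [x]) "" (by exact Int.natCast_nonneg _) (by simp)]
      simp
    simp only [List.foldl_cons, List.foldl_nil, hcongr, ih, hlast]
    by_cases hx : x = "Kim"
    · subst hx
      have hmem : "Kim" ∈ xs ++ ["Kim"] := by simp
      have hrev : (xs ++ ["Kim"]).reverse = "Kim" :: xs.reverse := by simp
      rw [if_pos rfl, if_pos hmem, hrev, PySem.List.index?_cons_self]
      simp
    · have hrev : (xs ++ [x]).reverse = x :: xs.reverse := by simp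
      rw [if_neg (by simpa using hx)]
      by_cases hmem : "Kim" ∈ xs
      · have hne : PySem.List.index? xs.reverse "Kim" ≠ none := fun h =>
          ((PySem.List.index?_eq_none_iff xs.reverse "Kim").mp h) (by simpa using hmem)
        obtain ⟨k, hk⟩ := Option.ne_none_iff_exists'.mp hne
        rw [if_pos hmem, if_pos (by simp [hmem]), hrev,
            PySem.List.index?_cons_of_ne _ hx, hk]
        simp
        omega
      · have hnm : "Kim" ∉ xs ++ [x] := by
          simp only [List.mem_append, List.mem_singleton]
          rintro (h | h)
          · exact hmem h
          · exact hx h.symm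
        rw [if_neg hmem, if_neg hnm]

-- ===== VERDICT (by name: the statement is the Claim_ definition above) =====
theorem solution_spec : Claim_equal_solution := by
  intro seoul _
  unfold Spec_solution solution solution_alt
  rw [place_eq]
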